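-- pv_equiv track=rewrite | github.com/duandy18/wms-du | app/services/pick_task_create.py | _aggregate_order_items_by_item
-- ===== SOURCE A (Python) =====
-- from typing import Dict, Optional, Tuple
--
-- def _aggregate_order_items_by_item(
--     items: list[dict],
-- ) -> Dict[int, Tuple[int, Optional[int]]]:
--     """
--     模型层收敛（药房处方语义）：
--     - 强制“一 item 一行”
--     - 将订单明细按 item_id 聚合 qty
--     - 同一 item_id 若存在多个 order_line_id：取最小的作为代表（用于可追溯/兼容字段）
--       注意：这个代表 id 只用于挂接，不表达“拆行”语义。
--     返回：
--       { item_id: (qty_sum, representative_order_line_id) }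
--     """
--     agg: Dict[int, Tuple[int, Optional[int]]] = {}
--
--     for row in items:
--         item_id = int(row.get("item_id") or 0)
--         if item_id <= 0:
--             continue
--
--         qty = int(row.get("qty") or 0)
--         if qty <= 0:
--             continue
--
--         ol = row.get("order_line_id")
--         order_line_id = int(ol) if ol is not None else None
--
--         if item_id not in agg:
--             agg[item_id] = (qty, order_line_id)
--         else:
--             cur_qty, cur_ol = agg[item_id]
--             new_qty = cur_qty + qty
--
--             # 代表 order_line_id：取更小的那个（保持稳定）
--             rep = cur_ol
--             if rep is None:
--                 rep = order_line_id
--             elif order_line_id is not None and int(order_line_id) < int(rep):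
--                 rep = order_line_id
--
--             agg[item_id] = (new_qty, rep)
--
--     return agg
-- ===== SOURCE B (Python) =====
-- from typing import Dict, Optional, Tuple
--
--
-- def _valid_entry(row: dict):
--     """Return (item_id, qty, order_line_id) if the row passes the guards, else None."""
--     item_id = int(row.get("item_id") or 0)
--     if item_id <= 0:
--         return None
--     qty = int(row.get("qty") or 0)
--     if qty <= 0:
--         return None
--     ol = row.get("order_line_id")
--     return (item_id, qty, int(ol) if ol is not None else None)
--
--
-- def _aggregate_order_items_by_item(
--     items: list[dict],
-- ) -> Dict[int, Tuple[int, Optional[int]]]: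
--     # Pass 1: group the valid (qty, order_line_id) pairs by item_id.
--     groups: Dict[int, list] = {}
--     for row in items:
--         entry = _valid_entry(row)
--         if entry is not None:
--             item_id, qty, order_line_id = entry
--             groups.setdefault(item_id, []).append((qty, order_line_id))
--     # Pass 2: reduce each group to (qty_sum, min non-None order_line_id).
--     result: Dict[int, Tuple[int, Optional[int]]] = {}
--     for item_id, pairs in groups.items():
--         qty_sum = sum(q for q, _ in pairs)
--         ols = [o for _, o in pairs if o is not None]
--         result[item_id] = (qty_sum, min(ols) if ols else None)
--     return result
-- ===== Notes on version B (the rewrite author's own statement) =====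
-- stated objective: alternative
-- what changed: A's single interleaved loop that updates a running (qty_sum, rep) pair per key is replaced by a two-pass grouping: first collect each key's (qty, order_line_id) pairs into a dict of lists, then reduce every group with sum and min over the non-None ids.
import Mathlib
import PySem

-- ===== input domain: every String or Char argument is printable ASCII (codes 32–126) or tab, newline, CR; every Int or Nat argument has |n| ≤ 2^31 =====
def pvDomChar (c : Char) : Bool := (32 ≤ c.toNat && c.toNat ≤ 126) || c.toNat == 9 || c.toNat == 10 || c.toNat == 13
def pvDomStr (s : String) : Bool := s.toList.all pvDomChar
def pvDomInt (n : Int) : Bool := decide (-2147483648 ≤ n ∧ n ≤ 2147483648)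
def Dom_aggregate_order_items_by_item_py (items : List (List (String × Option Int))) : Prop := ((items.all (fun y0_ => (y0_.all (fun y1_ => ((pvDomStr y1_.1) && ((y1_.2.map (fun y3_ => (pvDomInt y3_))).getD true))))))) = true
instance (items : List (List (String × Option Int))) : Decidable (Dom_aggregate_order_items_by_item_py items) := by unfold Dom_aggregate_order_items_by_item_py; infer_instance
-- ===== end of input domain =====

-- B replaces A's interleaved accumulate-per-key loop by group-by-key then reduce (sum, min); alternative decomposition, same cost.

-- ===== PORT A =====
-- A: one loop; per row compute guarded item_id/qty/order_line_id, then either insert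
-- a fresh (qty, ol) or fold it into the stored (cur_qty, cur_ol) pair.
def aggregate_order_items_by_item_py (items : List (List (String × Option Int))) : List (Int × Int × Option Int) :=
  (items.foldl (fun agg row =>
      let item_id : Int := (((PySem.Dict.mk row).get? "item_id").join).getD 0
      if item_id ≤ 0 then agg
      else
        let qty : Int := (((PySem.Dict.mk row).get? "qty").join).getD 0
        if qty ≤ 0 then agg
        else
          let order_line_id : Option Int := ((PySem.Dict.mk row).get? "order_line_id").join
          match agg.get? item_id with
          | none => agg.insert item_id (qty, order_line_id)
          | some (cur_qty, cur_ol) =>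
              let rep : Option Int :=
                match cur_ol with
                | none => order_line_id
                | some r =>
                    match order_line_id with
                    | none => some r
                    | some o => if o < r then some o else some r
              agg.insert item_id (cur_qty + qty, rep))
    PySem.Dict.empty).items

-- ===== PORT B =====
-- B helper: the row guards, factored out (returns none for a skipped row).
def pvValidEntry (row : List (String × Option Int)) : Option (Int × Int × Option Int) :=
  let item_id : Int := (((PySem.Dict.mk row).get? "item_id").join).getD 0
  if item_id ≤ 0 then none
  else
    let qty : Int := (((PySem.Dict.mk row).get? "qty").join).getD 0
    if qty ≤ 0 then none
    else some (item_id, qty, ((PySem.Dict.mk row).get? "order_line_id").join)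

-- B: pass 1 groups the valid (qty, ol) pairs by item_id; pass 2 maps each group to
-- (sum of qtys, min of the non-None order_line_ids).
def aggregate_order_items_by_item_py_alt (items : List (List (String × Option Int))) : List (Int × Int × Option Int) :=
  let groups : PySem.Dict Int (List (Int × Option Int)) :=
    items.foldl (fun g row =>
        match pvValidEntry row with
        | none => g
        | some (item_id, qty, order_line_id) => g.modify item_id [] (· ++ [(qty, order_line_id)]))
      PySem.Dict.empty
  groups.items.map (fun p =>
    let qty_sum : Int := (p.2.map (·.1)).sum
    let ols : List Int := p.2.filterMap (·.2)
    (p.1, qty_sum, PySem.List.min? ols (fun y => y)))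

-- ===== PRECONDITION & SPEC =====
def Spec_aggregate_order_items_by_item_py (items : List (List (String × Option Int))) (out : List (Int × Int × Option Int)) : Prop := out = aggregate_order_items_by_item_py_alt items
instance (items : List (List (String × Option Int))) (out : List (Int × Int × Option Int)) : Decidable (Spec_aggregate_order_items_by_item_py items out) := by unfold Spec_aggregate_order_items_by_item_py; infer_instance

-- ===== CLAIM (what is proved, stated in full; the proofs are below) =====
def Claim_equal_aggregate_order_items_by_item_py : Prop := ∀ (items : List (List (String × Option Int))), Dom_aggregate_order_items_by_item_py items → Spec_aggregate_order_items_by_item_py items (aggregate_order_items_by_item_py items)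

-- ===== LEMMAS AND PROOFS =====

-- A's per-key combining step, named for the proofs.
def pvStep1 (c : Int × Option Int) (x : Int × Option Int) : Int × Option Int :=
  (c.1 + x.1,
   match c.2 with
   | none => x.2
   | some r => match x.2 with | none => some r | some o => if o < r then some o else some r)

def pvAval (d : PySem.Dict Int (Int × Option Int)) (e : Int × Int × Option Int) :
    Int × Option Int :=
  match d.get? e.1 with | none => e.2 | some c => pvStep1 c e.2

def pvStepA (d : PySem.Dict Int (Int × Option Int)) (e : Int × Int × Option Int) :
    PySem.Dict Int (Int × Option Int) :=
  d.insert e.1 (pvAval d e)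

def pvStepG (g : PySem.Dict Int (List (Int × Option Int))) (e : Int × Int × Option Int) :
    PySem.Dict Int (List (Int × Option Int)) :=
  g.modify e.1 [] (· ++ [e.2])

def pvStepO (o : Option (Int × Option Int)) (x : Int × Option Int) : Option (Int × Option Int) :=
  some (match o with | none => x | some c => pvStep1 c x)

def pvComb (r : Option Int) (o : Option Int) : Option Int :=
  match r with
  | none => o
  | some rv => match o with | none => some rv | some ov => if ov < rv then some ov else some rv

lemma foldA_eq (items : List (List (String × Option Int)))
    (d : PySem.Dict Int (Int × Option Int)) :
    items.foldl (fun agg row =>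
      let item_id : Int := (((PySem.Dict.mk row).get? "item_id").join).getD 0
      if item_id ≤ 0 then agg
      else
        let qty : Int := (((PySem.Dict.mk row).get? "qty").join).getD 0
        if qty ≤ 0 then agg
        else
          let order_line_id : Option Int := ((PySem.Dict.mk row).get? "order_line_id").join
          match agg.get? item_id with
          | none => agg.insert item_id (qty, order_line_id)
          | some (cur_qty, cur_ol) =>
              let rep : Option Int :=
                match cur_ol with
                | none => order_line_id
                | some r =>
                    match order_line_id with
                    | none => some r
                    | some o => if o < r then some o else some r
              agg.insert item_id (cur_qty + qty, rep)) d
    = (items.filterMap pvValidEntry).foldl pvStepA d := by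
  induction items generalizing d with
  | nil => rfl
  | cons row t ih =>
      simp only [List.foldl_cons, List.filterMap_cons]
      rw [show pvValidEntry row = (let item_id : Int := (((PySem.Dict.mk row).get? "item_id").join).getD 0
        ; if item_id ≤ 0 then none
          else
            let qty : Int := (((PySem.Dict.mk row).get? "qty").join).getD 0
            if qty ≤ 0 then none
            else some (item_id, qty, ((PySem.Dict.mk row).get? "order_line_id").join)) from rfl]
      simp only []
      split_ifs with h1 h2
      · exact ih d
      · exact ih d
      · simp only [List.foldl_cons]
        rw [ih]
        congr 1
        cases h : d.get? ((((PySem.Dict.mk row).get? "item_id").join).getD 0) with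
        | none => simp [pvStepA, pvAval, h]
        | some c => cases c with
          | mk cq co => simp [pvStepA, pvAval, pvStep1, h]

lemma foldG_eq (items : List (List (String × Option Int)))
    (d : PySem.Dict Int (List (Int × Option Int))) :
    items.foldl (fun g row =>
        match pvValidEntry row with
        | none => g
        | some (item_id, qty, order_line_id) => g.modify item_id [] (· ++ [(qty, order_line_id)])) d
    = (items.filterMap pvValidEntry).foldl pvStepG d := by
  induction items generalizing d with
  | nil => rfl
  | cons row t ih =>
      simp only [List.foldl_cons, List.filterMap_cons]
      cases h : pvValidEntry row with
      | none => simpa [h] using ih d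
      | some e =>
          cases e with
          | mk k q => simp only [List.foldl_cons]; rw [ih]; rfl

lemma get?_foldA (l : List (Int × Int × Option Int)) (d : PySem.Dict Int (Int × Option Int))
    (k : Int) :
    (l.foldl pvStepA d).get? k
      = ((l.filter (fun e => e.1 == k)).map (·.2)).foldl pvStepO (d.get? k) := by
  induction l generalizing d with
  | nil => rfl
  | cons e t ih =>
      simp only [List.foldl_cons, List.filter_cons]
      by_cases hk : e.1 = k
      · subst hk
        simp only [BEq.rfl, if_pos, List.map_cons, List.foldl_cons]
        rw [ih]
        congr 1
        · rw [show pvStepA d e = d.insert e.1 (pvAval d e) from rfl,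
            PySem.Dict.get?_insert_self]
          unfold pvAval
          cases d.get? e.1 <;> rfl
      · have hbe : (e.1 == k) = false := by simp [hk]
        simp only [hbe, if_neg, Bool.false_eq_true, not_false_iff]
        rw [ih]
        congr 1
        rw [show pvStepA d e = d.insert e.1 (pvAval d e) from rfl]
        exact PySem.Dict.get?_insert_of_ne _ _ (fun h => hk h.symm)

lemma foldO_some (g : List (Int × Option Int)) (c : Int × Option Int) :
    g.foldl pvStepO (some c) = some (c.1 + (g.map (·.1)).sum, (g.map (·.2)).foldl pvComb c.2) := by
  induction g generalizing c with
  | nil => simp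
  | cons y t ih =>
      simp only [List.foldl_cons, List.map_cons, List.sum_cons]
      rw [show pvStepO (some c) y = some (pvStep1 c y) from rfl, ih]
      have h1 : (pvStep1 c y).1 = c.1 + y.1 := rfl
      have h2 : (pvStep1 c y).2 = pvComb c.2 y.2 := rfl
      rw [h1, h2]
      congr 2
      ring

lemma foldComb_eq_min? (os : List (Option Int)) (o : Option Int) :
    os.foldl pvComb o = PySem.List.min? (o.toList ++ os.filterMap id) (fun y => y) := by
  induction os generalizing o with
  | nil =>
      cases o with
      | none => rfl
      | some v => rfl
  | cons x t ih =>
      simp only [List.foldl_cons, List.filterMap_cons]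
      cases x with
      | none =>
          cases o with
          | none => simpa using ih none
          | some v => simpa using ih (some v)
      | some w =>
          cases o with
          | none => simpa using ih (some w)
          | some v =>
              rw [show pvComb (some v) (some w) = some (min v w) from by
                by_cases h : w < v <;> simp [pvComb, h, min_def]]
              rw [ih]
              simp only [Option.toList_some, List.singleton_append]
              rw [PySem.List.min?_id_cons, PySem.List.min?_id_cons]
              simp [List.foldl_cons]

lemma rep_eq (x : Int × Option Int) (rest : List (Int × Option Int)) :
    (rest.map (·.2)).foldl pvComb x.2
      = PySem.List.min? ((x :: rest).filterMap (·.2)) (fun y => y) := by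
  rw [foldComb_eq_min?]
  congr 1
  rw [List.filterMap_cons]
  cases h : x.2 with
  | none => simp [List.filterMap_map]
  | some v => simp [List.filterMap_map]

lemma core_eq (L : List (Int × Int × Option Int)) :
    (L.foldl pvStepA PySem.Dict.empty).items
      = ((L.foldl pvStepG PySem.Dict.empty).items).map (fun p =>
          (p.1, (p.2.map (·.1)).sum, PySem.List.min? (p.2.filterMap (·.2)) (fun y => y))) := by
  have hAshape : pvStepA = (fun d (x : Int × Int × Option Int) => d.insert x.1 (pvAval d x)) := rfl
  have hGshape : pvStepG = (fun g (x : Int × (Int × Option Int)) => g.modify x.1 [] (fun v => v ++ [x.2])) := rfl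
  set dA := L.foldl pvStepA PySem.Dict.empty with hdA
  set dG := L.foldl pvStepG PySem.Dict.empty with hdG
  have hndA : dA.keys.Nodup := by
    rw [hdA, hAshape]
    exact PySem.Dict.nodup_keys_foldl_insert_key L (·.1) pvAval _ (by simp)
  have hndG : dG.keys.Nodup := by
    rw [hdG, hGshape]
    exact PySem.Dict.nodup_keys_foldl_modify_key L (·.1) [] _ _ (by simp)
  have hkeys : dA.keys = dG.keys := by
    rw [hdA, hdG, hAshape, hGshape]
    rw [PySem.Dict.keys_foldl_insert_key L (·.1) pvAval PySem.Dict.empty,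
      PySem.Dict.keys_foldl_modify_key L (·.1) [] (fun g x v => v ++ [x.2]) PySem.Dict.empty]
    rfl

  rw [PySem.Dict.items_eq_map_keys dA hndA (0, none),
      PySem.Dict.items_eq_map_keys dG hndG [], hkeys, List.map_map]
  apply List.map_congr_left
  intro k hk
  -- k is the key of some entry of L
  have hkmem : k ∈ L.map (·.1) := by
    rw [hdG, hGshape] at hk
    rw [PySem.Dict.keys_foldl_modify_key L (·.1) [] (fun g x v => v ++ [x.2]) PySem.Dict.empty] at hk
    have := (PySem.Set.mem_update _ _ _).1 hk
    simpa using this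
  have hGk : dG.getD k [] = (L.filter (fun e => e.1 == k)).map (·.2) := by
    rw [hdG, hGshape]
    rw [PySem.Dict.getD_foldl_modify_append L PySem.Dict.empty k]
    simp
  have hAk : dA.get? k = ((L.filter (fun e => e.1 == k)).map (·.2)).foldl pvStepO none := by
    rw [hdA, get?_foldA, PySem.Dict.get?_empty]
  have hne : (L.filter (fun e => e.1 == k)).map (·.2) ≠ [] := by
    obtain ⟨e, heL, hek⟩ := List.exists_of_mem_map hkmem
    have : e ∈ L.filter (fun e => e.1 == k) := by
      rw [List.mem_filter]
      exact ⟨heL, by simp [hek]⟩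
    exact List.ne_nil_of_mem (List.mem_map_of_mem this)
  cases hgk : (L.filter (fun e => e.1 == k)).map (·.2) with
  | nil => exact absurd hgk hne
  | cons x rest =>
      rw [hgk] at hAk
      rw [List.foldl_cons, show pvStepO none x = some x from rfl, foldO_some] at hAk
      simp only [Function.comp_def]
      rw [hGk, hgk, PySem.Dict.getD_eq_get?_getD, hAk, rep_eq]
      simp

theorem aggregate_order_items_by_item_py_spec : Claim_equal_aggregate_order_items_by_item_py := by
  intro items _
  unfold Spec_aggregate_order_items_by_item_py
  unfold aggregate_order_items_by_item_py aggregate_order_items_by_item_py_alt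
  rw [foldA_eq, foldG_eq]
  exact core_eq (items.filterMap pvValidEntry)
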